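-- pv_equiv track=rewrite | github.com/dreamup-ai/stable-diffusion-service | server/model_loaders.py | get_model_and_config_from_civitai_payload
-- ===== SOURCE A (Python) =====
-- def get_model_and_config_from_civitai_payload(payload):
--     model_file = None
--     config_file = None
--     for file in payload["files"]:
--         if file["type"] == "Model":
--             model_file = file
--         elif file["type"] == "Config":
--             config_file = file
--     return model_file, config_file
-- ===== SOURCE B (Python) =====
-- def get_model_and_config_from_civitai_payload(payload):
--     files = payload["files"]
--     model_file = next((f for f in reversed(files) if f["type"] == "Model"), None)
--     config_file = next((f for f in reversed(files) if f["type"] == "Config"), None)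
--     return model_file, config_file
-- ===== Notes on version B (the rewrite author's own statement) =====
-- stated objective: alternative
-- what changed: Replaces the single forward accumulate-and-overwrite loop with two independent reverse scans that each stop at the first (i.e. last-in-order) matching file.
import Mathlib
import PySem

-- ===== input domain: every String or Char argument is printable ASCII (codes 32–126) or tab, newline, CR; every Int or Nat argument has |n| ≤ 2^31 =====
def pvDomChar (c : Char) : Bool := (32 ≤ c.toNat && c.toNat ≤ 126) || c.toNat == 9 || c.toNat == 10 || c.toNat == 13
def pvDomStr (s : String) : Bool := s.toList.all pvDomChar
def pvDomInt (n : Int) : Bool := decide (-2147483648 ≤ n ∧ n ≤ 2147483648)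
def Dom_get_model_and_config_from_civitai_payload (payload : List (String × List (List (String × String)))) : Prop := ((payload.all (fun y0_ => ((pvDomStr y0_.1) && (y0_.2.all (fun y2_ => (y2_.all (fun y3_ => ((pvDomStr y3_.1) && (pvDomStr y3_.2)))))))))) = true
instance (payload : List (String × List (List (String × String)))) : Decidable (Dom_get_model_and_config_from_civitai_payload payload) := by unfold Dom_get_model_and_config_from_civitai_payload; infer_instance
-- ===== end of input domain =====

-- B computes the two results by two independent reverse early-exit searches instead of A's
-- single forward accumulate-and-overwrite pass (objective: alternative decomposition, same cost).


-- ===== PORT A =====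
-- payload["files"] / file["type"]: dict lookup = first match in the association list
-- (List.lookup); a missing key is Python's KeyError, excluded by Pre_ below.
def get_model_and_config_from_civitai_payload (payload : List (String × List (List (String × String)))) : (Option (List (String × String))) × (Option (List (String × String))) :=
  match List.lookup "files" payload with
  | none => (none, none)   -- KeyError in Python; outside Pre_
  | some files =>
      files.foldl (fun (st : Option (List (String × String)) × Option (List (String × String))) file =>
        if List.lookup "type" file == some "Model" then (some file, st.2)
        else if List.lookup "type" file == some "Config" then (st.1, some file)
        else st) (none, none)

-- ===== PORT B =====
-- next((f for f in reversed(files) if f["type"] == t), None)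
def pvFindRev (files : List (List (String × String))) (t : String) : Option (List (String × String)) :=
  files.reverse.find? (fun f => List.lookup "type" f == some t)

def get_model_and_config_from_civitai_payload_alt (payload : List (String × List (List (String × String)))) : (Option (List (String × String))) × (Option (List (String × String))) :=
  match List.lookup "files" payload with
  | none => (none, none)   -- KeyError in Python; outside Pre_
  | some files => (pvFindRev files "Model", pvFindRev files "Config")

-- ===== PRECONDITION & SPEC =====
-- Pre_ = exactly where Python A returns: the payload has a "files" key and every file has a "type" key
-- (otherwise A raises KeyError).
def Pre_get_model_and_config_from_civitai_payload (payload : List (String × List (List (String × String)))) : Prop :=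
  (List.lookup "files" payload).isSome = true ∧
  ∀ f ∈ (List.lookup "files" payload).getD [], (List.lookup "type" f).isSome = true
instance (payload : List (String × List (List (String × String)))) : Decidable (Pre_get_model_and_config_from_civitai_payload payload) := by unfold Pre_get_model_and_config_from_civitai_payload; infer_instance

def pvWitness_get_model_and_config_from_civitai_payload : (List (String × List (List (String × String)))) :=
  [("files", [[("type", "Model"), ("name", "m.ckpt")], [("type", "Config"), ("name", "c.yaml")]])]

def Spec_get_model_and_config_from_civitai_payload (payload : List (String × List (List (String × String)))) (out : (Option (List (String × String))) × (Option (List (String × String)))) : Prop := out = get_model_and_config_from_civitai_payload_alt payload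
instance (payload : List (String × List (List (String × String)))) (out : (Option (List (String × String))) × (Option (List (String × String)))) : Decidable (Spec_get_model_and_config_from_civitai_payload payload out) := by unfold Spec_get_model_and_config_from_civitai_payload; infer_instance

-- ===== CLAIM (what is proved, stated in full; the proofs are below) =====
def Claim_equal_get_model_and_config_from_civitai_payload : Prop := ∀ (payload : List (String × List (List (String × String)))), Dom_get_model_and_config_from_civitai_payload payload → Pre_get_model_and_config_from_civitai_payload payload → Spec_get_model_and_config_from_civitai_payload payload (get_model_and_config_from_civitai_payload payload)

-- ===== LEMMAS AND PROOFS =====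

-- A's overwrite loop, started from any accumulator (m, c), ends with the last match of each
-- type (i.e. the first match of the reversed list), falling back to the start value.
theorem pv_fold_eq_findRev (files : List (List (String × String)))
    (m c : Option (List (String × String))) :
    files.foldl (fun (st : Option (List (String × String)) × Option (List (String × String))) file =>
        if List.lookup "type" file == some "Model" then (some file, st.2)
        else if List.lookup "type" file == some "Config" then (st.1, some file)
        else st) (m, c)
    = ((files.reverse.find? (fun f => List.lookup "type" f == some "Model")).or m,
       (files.reverse.find? (fun f => List.lookup "type" f == some "Config")).or c) := by
  induction files generalizing m c with
  | nil => simp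
  | cons f fs ih =>
      simp only [List.foldl_cons, List.reverse_cons, List.find?_append]
      by_cases hM : List.lookup "type" f == some "Model"
      · have hC : ¬ (List.lookup "type" f == some "Config") := by
          simp_all
        rw [ih]
        simp [hM, hC, List.find?]
      · by_cases hC : List.lookup "type" f == some "Config"
        · rw [ih]
          simp [hM, hC, List.find?]
        · rw [ih]
          simp [hM, hC, List.find?]

-- ===== VERDICT (by name: the statement is the Claim_ definition above) =====
theorem get_model_and_config_from_civitai_payload_spec : Claim_equal_get_model_and_config_from_civitai_payload := by
  intro payload _ hpre
  unfold Spec_get_model_and_config_from_civitai_payload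
  unfold get_model_and_config_from_civitai_payload get_model_and_config_from_civitai_payload_alt
  cases h : List.lookup "files" payload with
  | none => rfl
  | some files =>
      simp only [pvFindRev, pv_fold_eq_findRev, Option.or_none]
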